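-- pv_equiv track=rewrite | github.com/9kin/shop-new | shop/main.py | items_path
-- ===== SOURCE A (Python) =====
-- menu_map = {"others": "x"}
--
-- def items_path(path):
--     path_list = []
--     prev = ""
--     try:
--         for i in enumerate(path.split(".")):
--             if i[0] != 0:
--                 prev += "."
--             prev += str(i[1])
--             path_list.append(menu_map[prev])
--     except:
--         path_list = []
--     return path_list
-- ===== SOURCE B (Python) =====
-- menu_map = {"others": "x"}
--
-- def items_path(path):
--     try:
--         parts = path.split(".")
--     except:
--         return []
--     prefixes = [".".join(parts[:i + 1]) for i in range(len(parts))]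
--     if all(p in menu_map for p in prefixes):
--         return [menu_map[p] for p in prefixes]
--     return []
-- ===== Notes on version B (the rewrite author's own statement) =====
-- stated objective: simpler
-- what changed: A interleaves prefix-building, dict lookup and appending in one loop whose KeyError exception discards the accumulator; B first builds the full prefix list with a comprehension, then checks all(p in menu_map) and maps the lookups in a separate pass.
import Mathlib
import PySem

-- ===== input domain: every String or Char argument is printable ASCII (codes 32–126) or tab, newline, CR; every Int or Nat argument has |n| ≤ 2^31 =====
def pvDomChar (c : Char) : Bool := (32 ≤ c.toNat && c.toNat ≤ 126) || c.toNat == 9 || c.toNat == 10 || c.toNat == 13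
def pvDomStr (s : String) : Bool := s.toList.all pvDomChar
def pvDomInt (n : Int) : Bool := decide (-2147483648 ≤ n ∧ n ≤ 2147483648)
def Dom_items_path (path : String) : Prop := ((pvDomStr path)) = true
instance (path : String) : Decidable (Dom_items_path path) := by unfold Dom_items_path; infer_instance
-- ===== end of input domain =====

-- B replaces A's single interleaved lookup-and-early-abort loop (whose exception clears the
-- accumulator) with a build-prefixes / check-all / map decomposition; objective: simpler.

-- ===== PORT A =====
def pvMenuMap : PySem.Dict String String := ⟨[("others", "x")]⟩

-- the for-loop body; the 'except' (a KeyError from menu_map[prev]) is the 'none' outcome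
def pvItemsGo : List (Int × String) → String → List String → Option (List String)
  | [], _, acc => some acc
  | (i, s) :: rest, prev, acc =>
    let prev1 := if i ≠ 0 then prev ++ "." else prev
    let prev2 := prev1 ++ s
    match PySem.Dict.get? pvMenuMap prev2 with
    | some v => pvItemsGo rest prev2 (acc ++ [v])
    | none => none

def items_path (path : String) : List String :=
  -- path.split("."): split? is none only for an empty separator, never here
  let parts := (PySem.Str.split? path ".").getD []
  match pvItemsGo (PySem.List.enumerate parts) "" [] with
  | some l => l
  | none => []

-- ===== PORT B =====
-- prefixes = [".".join(parts[:i + 1]) for i in range(len(parts))]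
def pvPrefixes (parts : List String) : List String :=
  (List.range parts.length).map (fun i => PySem.Str.join "." (parts.take (i + 1)))

def items_path_alt (path : String) : List String :=
  if (pvPrefixes ((PySem.Str.split? path ".").getD [])).all
       (fun p => PySem.Dict.contains pvMenuMap p) then
    -- menu_map[p]: the lookup is guarded by the all-check, so the default is never read
    (pvPrefixes ((PySem.Str.split? path ".").getD [])).map
      (fun p => PySem.Dict.getD pvMenuMap p "")
  else []

-- ===== PRECONDITION & SPEC =====
def Spec_items_path (path : String) (out : List String) : Prop := out = items_path_alt path
instance (path : String) (out : List String) : Decidable (Spec_items_path path out) := by unfold Spec_items_path; infer_instance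

-- ===== CLAIM (what is proved, stated in full; the proofs are below) =====
def Claim_equal_items_path : Prop := ∀ (path : String), Dom_items_path path → Spec_items_path path (items_path path)

-- ===== LEMMAS AND PROOFS =====

theorem pv_get?_eq (s : String) :
    PySem.Dict.get? pvMenuMap s = if s = "others" then some "x" else none := by
  show PySem.Dict.get? ⟨[("others", "x")]⟩ s = _
  rw [PySem.Dict.get?_mk_cons]
  by_cases h : s = "others"
  · simp [h]
  · have hb : ("others" == s) = false := beq_eq_false_iff_ne.mpr (fun hh => h hh.symm)
    rw [hb, if_neg h]
    simp only [Bool.false_eq_true, if_false]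
    rfl

theorem pv_contains_eq (s : String) :
    PySem.Dict.contains pvMenuMap s = decide (s = "others") := by
  show PySem.Dict.contains ⟨[("others", "x")]⟩ s = _
  rw [PySem.Dict.contains_mk]
  by_cases h : s = "others"
  · simp [h]
  · have hb : ("others" == s) = false := beq_eq_false_iff_ne.mpr (fun hh => h hh.symm)
    simp [hb, h]

theorem pv_dot_ne (q : String) : "others." ++ q ≠ "others" := by
  intro hc
  have := congrArg (fun s => s.toList.length) hc
  simp [String.toList_append] at this

theorem pv_dot_ne' (q : String) : "others" ++ "." ++ q ≠ "others" := by
  intro hc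
  have := congrArg (fun s => s.toList.length) hc
  simp [String.toList_append] at this

theorem pv_join_one (p : String) : PySem.Str.join "." [p] = p := by
  rw [← String.toList_inj, PySem.Str.toList_join]
  simp [PySem.Chars.join_singleton]

theorem pv_join_two (p q : String) : PySem.Str.join "." [p, q] = p ++ "." ++ q := by
  rw [← String.toList_inj, PySem.Str.toList_join]
  simp [PySem.Chars.join_cons_cons, PySem.Chars.join_singleton, String.toList_append]

theorem pvA_char (parts : List String) :
    (match pvItemsGo (PySem.List.enumerate parts) "" [] with
     | some l => l
     | none => []) = if parts = ["others"] then ["x"] else [] := by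
  match parts with
  | [] => simp [PySem.List.enumerate_nil, pvItemsGo]
  | [p] =>
    by_cases h : p = "others" <;>
      simp [PySem.List.enumerate_cons, PySem.List.enumerate_nil, pvItemsGo, pv_get?_eq, h]
  | p :: q :: rest =>
    by_cases h : p = "others"
    · subst h
      simp [PySem.List.enumerate_cons, pvItemsGo, pv_get?_eq, pv_dot_ne]
    · simp [PySem.List.enumerate_cons, pvItemsGo, pv_get?_eq, h]

theorem pvB_char (parts : List String) :
    (if (pvPrefixes parts).all (fun p => PySem.Dict.contains pvMenuMap p) then
       (pvPrefixes parts).map (fun p => PySem.Dict.getD pvMenuMap p "")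
     else [])
    = if parts = ["others"] then ["x"] else [] := by
  match parts with
  | [] => simp [pvPrefixes]
  | [p] =>
    by_cases h : p = "others" <;>
      simp [pvPrefixes, List.range_succ, pv_join_one, pv_contains_eq, h, PySem.Dict.getD, pv_get?_eq]
  | p :: q :: rest =>
    have hfalse :
        (pvPrefixes (p :: q :: rest)).all
          (fun s => PySem.Dict.contains pvMenuMap s) = false := by
      unfold pvPrefixes
      by_cases h : p = "others"
      · subst h
        apply List.all_eq_false.mpr
        refine ⟨PySem.Str.join "." ["others", q], ?_, ?_⟩
        · exact List.mem_map.mpr ⟨1, by simp [List.mem_range], by simp⟩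
        · rw [pv_join_two, pv_contains_eq]
          simpa using pv_dot_ne' q
      · apply List.all_eq_false.mpr
        refine ⟨PySem.Str.join "." [p], ?_, ?_⟩
        · exact List.mem_map.mpr ⟨0, by simp [List.mem_range], by simp⟩
        · rw [pv_join_one, pv_contains_eq]
          simp [h]
    simp only [hfalse]
    simp

-- ===== VERDICT (by name: the statement is the Claim_ definition above) =====
theorem items_path_spec : Claim_equal_items_path := by
  intro path _
  show items_path path = items_path_alt path
  unfold items_path items_path_alt
  rw [pvA_char ((PySem.Str.split? path ".").getD []),
      pvB_char ((PySem.Str.split? path ".").getD [])]
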